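-- pv_equiv track=rewrite | github.com/Porchetta/AutoTestManager | backend/app/services/rtd_execution_custom.py | _collect_selected_rule_names
-- ===== SOURCE A (Python) =====
-- from typing import Any
--
-- def _collect_selected_rule_names(session_payload: dict[str, Any]) -> list[str]:
--     """Return unique selected rule names sorted by rule name."""
--     seen: set[str] = set()
--     result: list[str] = []
--     for item in _sorted_selected_rule_targets(session_payload):
--         rule_name = str(item.get("rule_name", "")).strip()
--         if not rule_name or rule_name in seen:
--             continue
--         seen.add(rule_name)
--         result.append(rule_name)
--     return result
--
-- def _sorted_selected_rule_targets(session_payload: dict[str, Any]) -> list[dict[str, Any]]: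
--     """
--     Return selected RTD rule targets sorted by rule name.
--
--     This keeps copy / compile / test execution order stable regardless of the
--     order in which the user added rules in the UI.
--     """
--     selected_rule_targets = (
--         session_payload.get("selected_rule_targets", [])
--         if isinstance(session_payload.get("selected_rule_targets"), list)
--         else []
--     )
--     return sorted(
--         selected_rule_targets,
--         key=lambda item: (
--             str(item.get("rule_name", "")).strip().lower(),
--             str(item.get("new_version", "")).strip().lower(),
--             str(item.get("old_version", "")).strip().lower(),
--         ),
--     )
-- ===== SOURCE B (Python) =====
-- from typing import Any
--
--
-- def _collect_selected_rule_names(session_payload: dict[str, Any]) -> list[str]: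
--     """Return unique selected rule names sorted by rule name.
--
--     One pass over the raw (unsorted) selected rule targets builds, for each
--     exact stripped rule name, the minimal (sort-key, input-index) pair seen
--     for it; the names are then emitted in the order of those stored pairs.
--     """
--     targets = session_payload.get("selected_rule_targets", [])
--     if not isinstance(targets, list):
--         targets = []
--     best: dict[str, tuple] = {}
--     for idx, item in enumerate(targets):
--         name = str(item.get("rule_name", "")).strip()
--         if not name:
--             continue
--         k = (
--             (
--                 name.lower(),
--                 str(item.get("new_version", "")).strip().lower(),
--                 str(item.get("old_version", "")).strip().lower(),
--             ),
--             idx,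
--         )
--         cur = best.get(name)
--         if cur is None or k < cur:
--             best[name] = k
--     return [name for name, _ in sorted(best.items(), key=lambda kv: kv[1])]
-- ===== Notes on version B (the rewrite author's own statement) =====
-- stated objective: alternative
-- what changed: Instead of sorting all targets by a 3-tuple key and then scanning with a seen-set (sort-then-dedup), B makes one pass over the unsorted targets building a dict from each exact stripped rule name to the minimal (key, input-index) pair for it, then sorts only the distinct table entries by that stored pair.
import Mathlib
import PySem

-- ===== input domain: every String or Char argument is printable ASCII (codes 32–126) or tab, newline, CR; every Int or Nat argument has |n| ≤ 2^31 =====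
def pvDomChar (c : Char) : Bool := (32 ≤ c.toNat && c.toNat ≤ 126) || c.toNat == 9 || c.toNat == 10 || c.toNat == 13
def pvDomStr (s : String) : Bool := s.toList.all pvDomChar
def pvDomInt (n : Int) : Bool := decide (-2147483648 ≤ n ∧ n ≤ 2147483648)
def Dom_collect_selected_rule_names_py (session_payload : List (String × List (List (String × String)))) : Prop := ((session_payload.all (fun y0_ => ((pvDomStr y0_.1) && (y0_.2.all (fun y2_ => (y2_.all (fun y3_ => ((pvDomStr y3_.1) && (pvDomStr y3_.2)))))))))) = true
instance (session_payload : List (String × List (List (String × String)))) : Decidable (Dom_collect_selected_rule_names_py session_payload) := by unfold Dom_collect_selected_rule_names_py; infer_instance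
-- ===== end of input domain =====

-- B replaces A's "stable-sort all targets, then dedup with a seen-set" by "one pass building a
-- per-name minimal (key, index) table, then sort only the distinct table entries" (alternative algorithm).


-- ===== PORT A =====
-- str(item.get("rule_name", "")).strip() — str() is the identity on the string values of the ported type
def pvNameOf (item : List (String × String)) : String :=
  PySem.Str.strip (PySem.Dict.getD (PySem.Dict.mk item) "rule_name" "")

-- the sort key: Python's 3-tuple of strings, compared lexicographically; ported as a 3-element
-- list of strings (for equal-length lists, List's lexicographic order is exactly tuple comparison)
def pvKey3 (item : List (String × String)) : List String :=
  [PySem.Str.lower (pvNameOf item),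
   PySem.Str.lower (PySem.Str.strip (PySem.Dict.getD (PySem.Dict.mk item) "new_version" "")),
   PySem.Str.lower (PySem.Str.strip (PySem.Dict.getD (PySem.Dict.mk item) "old_version" ""))]

-- _sorted_selected_rule_targets: under the ported type .get("selected_rule_targets") is a list
-- whenever the key is present, so the isinstance(..., list) test always passes and the whole
-- expression is the dict lookup with default [].
def pvSortedTargets (session_payload : List (String × List (List (String × String)))) : List (List (String × String)) :=
  PySem.List.sorted (PySem.Dict.getD (PySem.Dict.mk session_payload) "selected_rule_targets" []) pvKey3

def collect_selected_rule_names_py (session_payload : List (String × List (List (String × String)))) : List String :=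
  (List.foldl (fun (st : PySem.Set String × List String) item =>
      let rule_name := pvNameOf item
      if rule_name = "" ∨ PySem.Set.contains st.1 rule_name then st
      else (PySem.Set.add st.1 rule_name, st.2 ++ [rule_name]))
    (PySem.Set.empty, []) (pvSortedTargets session_payload)).2

-- ===== PORT B =====
def collect_selected_rule_names_py_alt (session_payload : List (String × List (List (String × String)))) : List String :=
  let targets := PySem.Dict.getD (PySem.Dict.mk session_payload) "selected_rule_targets" []
  let best := List.foldl
    (fun (best : PySem.Dict String (Lex (List String × Int))) p =>
      let name := pvNameOf p.2
      if name = "" then best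
      else
        let k := toLex (pvKey3 p.2, p.1)
        match best.get? name with
        | none => best.insert name k
        | some cur => if k < cur then best.insert name k else best)
    PySem.Dict.empty (PySem.List.enumerate targets 0)
  (PySem.List.sorted best.items (fun kv => kv.2)).map (fun kv => kv.1)

-- ===== PRECONDITION & SPEC =====
def Spec_collect_selected_rule_names_py (session_payload : List (String × List (List (String × String)))) (out : List String) : Prop := out = collect_selected_rule_names_py_alt session_payload
instance (session_payload : List (String × List (List (String × String)))) (out : List String) : Decidable (Spec_collect_selected_rule_names_py session_payload out) := by unfold Spec_collect_selected_rule_names_py; infer_instance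

-- ===== CLAIM (what is proved, stated in full; the proofs are below) =====
def Claim_equal_collect_selected_rule_names_py : Prop := ∀ (session_payload : List (String × List (List (String × String)))), Dom_collect_selected_rule_names_py session_payload → Spec_collect_selected_rule_names_py session_payload (collect_selected_rule_names_py session_payload)

-- ===== LEMMAS AND PROOFS =====

-- full key: (3-tuple key, original index), the value B's table stores
def pvF (p : Int × List (String × String)) : Lex (List String × Int) :=
  toLex (pvKey3 p.2, p.1)

def pvPair (p : Int × List (String × String)) : String × Lex (List String × Int) :=
  (pvNameOf p.2, pvF p)

-- the (name, full key) pairs with empty names dropped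
def pvT (E : List (Int × List (String × String))) : List (String × Lex (List String × Int)) :=
  (E.map pvPair).filter (fun q => !(q.1 == ""))

-- first occurrence per name, given the names already seen
def pvFirstOcc (seen : PySem.Set String) :
    List (String × Lex (List String × Int)) →
    List (String × Lex (List String × Int))
  | [] => []
  | q :: l => if PySem.Set.contains seen q.1 then pvFirstOcc seen l
              else q :: pvFirstOcc (PySem.Set.add seen q.1) l

-- A's seen-set loop, abstracted on the name list
def pvDedup (seen : PySem.Set String) : List String → List String
  | [] => []
  | s :: l => if PySem.Set.contains seen s then pvDedup seen l
              else s :: pvDedup (PySem.Set.add seen s) l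

-- B's table invariant: the dict holds, for each name, the minimum full key among the processed pairs
def pvInv (d : PySem.Dict String (Lex (List String × Int)))
    (prev : List (String × Lex (List String × Int))) : Prop :=
  ∀ n, (match d.get? n with
    | none => ∀ w, (n, w) ∉ prev
    | some v => (n, v) ∈ prev ∧ ∀ w, (n, w) ∈ prev → v ≤ w)

-- (1) decoration: A's stable sort of the targets is the snd-projection of the sort by (key, index)
lemma pv_ins_map (n : Int) (d : List (String × String)) (acc' : List (Int × List (String × String)))
    (h : ∀ q ∈ acc', q.1 < n) :
    (PySem.List.insertBy (fun p q => decide (pvF p < pvF q)) (n, d) acc').map (·.2)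
      = PySem.List.insertBy (fun a b => decide (pvKey3 a < pvKey3 b)) d (acc'.map (·.2)) := by
  induction acc' with
  | nil => simp [PySem.List.insertBy]
  | cons q l ih =>
    have hq : q.1 < n := h q (List.mem_cons_self)
    have hb : (decide (pvF (n, d) < pvF q)) = decide (pvKey3 d < pvKey3 q.2) := by
      apply decide_eq_decide.mpr
      unfold pvF
      rw [Prod.Lex.toLex_lt_toLex]
      constructor
      · rintro (h1 | ⟨h1, h2⟩)
        · exact h1
        · exact absurd h2 (by omega)
      · intro h1; exact Or.inl h1
    by_cases hc : pvKey3 d < pvKey3 q.2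
    · simp [PySem.List.insertBy, hb, hc]
    · simp only [PySem.List.insertBy, hb, List.map_cons]
      rw [if_neg (by simpa using hc), if_neg (by simpa using hc)]
      simp only [List.map_cons]
      rw [ih (fun r hr => h r (List.mem_cons_of_mem _ hr))]

lemma pv_fold_map : ∀ (ts : List (List (String × String))) (n : Int) (acc' : List (Int × List (String × String))),
    (∀ q ∈ acc', q.1 < n) →
    ((PySem.List.enumerate ts n).foldl (fun acc p => PySem.List.insertBy (fun p q => decide (pvF p < pvF q)) p acc) acc').map (·.2)
      = ts.foldl (fun acc d => PySem.List.insertBy (fun a b => decide (pvKey3 a < pvKey3 b)) d acc) (acc'.map (·.2)) := by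
  intro ts
  induction ts with
  | nil => intro n acc' h; simp [PySem.List.enumerate_nil]
  | cons x ts ih =>
    intro n acc' h
    rw [PySem.List.enumerate_cons]
    simp only [List.foldl_cons]
    rw [ih (n + 1) _ ?_, pv_ins_map n x acc' h]
    intro q hq
    rcases (PySem.List.mem_insertBy _ _ _ _).mp hq with rfl | hmem
    · omega
    · have := h q hmem; omega

lemma pv_sorted_decorated (sp : List (String × List (List (String × String)))) :
    pvSortedTargets sp
      = (PySem.List.sorted (PySem.List.enumerate (PySem.Dict.getD (PySem.Dict.mk sp) "selected_rule_targets" []) 0) pvF).map (·.2) := by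
  unfold pvSortedTargets
  rw [PySem.List.sorted_eq_foldl_insertBy, PySem.List.sorted_eq_foldl_insertBy]
  exact (pv_fold_map _ 0 [] (by intro q hq; simp at hq)).symm

-- (2) A's loop is pvDedup of the nonempty names
lemma pv_foldA (L : List (List (String × String))) : ∀ (seen : PySem.Set String) (res : List String),
    (List.foldl (fun (st : PySem.Set String × List String) item =>
      let rule_name := pvNameOf item
      if rule_name = "" ∨ PySem.Set.contains st.1 rule_name then st
      else (PySem.Set.add st.1 rule_name, st.2 ++ [rule_name])) (seen, res) L).2
      = res ++ pvDedup seen ((L.map pvNameOf).filter (fun s => !(s == ""))) := by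
  induction L with
  | nil => intro seen res; simp [pvDedup]
  | cons x L ih =>
    intro seen res
    simp only [List.foldl_cons, List.map_cons, List.filter_cons]
    by_cases h1 : pvNameOf x = ""
    · rw [if_pos (Or.inl h1)]
      rw [show (!(pvNameOf x == "")) = false from by simp [h1]]
      simp only [Bool.false_eq_true, if_false]
      exact ih seen res
    · rw [show (!(pvNameOf x == "")) = true from by simp [h1], if_pos rfl]
      by_cases h2 : PySem.Set.contains seen (pvNameOf x) = true
      · rw [if_pos (Or.inr h2)]
        simp only [pvDedup]
        rw [if_pos h2]
        exact ih seen res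
      · rw [if_neg (not_or.mpr ⟨h1, h2⟩)]
        simp only [pvDedup]
        rw [if_neg h2, ih (PySem.Set.add seen (pvNameOf x)) (res ++ [pvNameOf x]),
          List.append_assoc, List.singleton_append]

lemma pv_dedup_firstOcc (l : List (String × Lex (List String × Int))) :
    ∀ seen, pvDedup seen (l.map (·.1)) = (pvFirstOcc seen l).map (·.1) := by
  induction l with
  | nil => intro seen; simp [pvDedup, pvFirstOcc]
  | cons q l ih =>
    intro seen
    simp only [List.map_cons, pvDedup, pvFirstOcc]
    by_cases h : q.1 ∈ seen
    · simp only [if_pos ((PySem.Set.contains_iff seen q.1).mpr h)]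
      exact ih seen
    · simp only [if_neg (fun hc => h ((PySem.Set.contains_iff seen q.1).mp hc))]
      rw [List.map_cons, ih (PySem.Set.add seen q.1)]

lemma pv_names_T (E : List (Int × List (String × String))) :
    ((E.map (·.2)).map pvNameOf).filter (fun s => !(s == "")) = (pvT E).map (·.1) := by
  unfold pvT
  induction E with
  | nil => rfl
  | cons p E ih =>
    simp only [List.map_cons, List.filter_cons]
    by_cases h : pvNameOf p.2 = "" <;>
      simp only [List.map_map] at ih ⊢ <;>
      simp [pvPair, h, ih]

-- (3) pvFirstOcc keeps a sublist
lemma pv_firstOcc_sublist (l : List (String × Lex (List String × Int))) :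
    ∀ seen, (pvFirstOcc seen l).Sublist l := by
  induction l with
  | nil => intro seen; simp [pvFirstOcc]
  | cons q l ih =>
    intro seen
    by_cases h : PySem.Set.contains seen q.1 = true
    · simp only [pvFirstOcc, if_pos h]
      exact (ih seen).cons q
    · simp only [pvFirstOcc, if_neg h]
      exact (ih _).cons₂ q

-- on a strictly snd-increasing list pvFirstOcc keeps exactly the per-name minima
lemma pv_mem_firstOcc : ∀ (l : List (String × Lex (List String × Int))),
    l.Pairwise (fun a b => a.2 < b.2) →
    ∀ (seen : PySem.Set String) (n : String) v,
      ((n, v) ∈ pvFirstOcc seen l ↔ (n ∉ seen ∧ (n, v) ∈ l ∧ ∀ w, (n, w) ∈ l → v ≤ w)) := by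
  intro l
  induction l with
  | nil => intro _ seen n v; simp [pvFirstOcc]
  | cons q l ih =>
    intro hl seen n v
    obtain ⟨hq, hl'⟩ := List.pairwise_cons.mp hl
    by_cases hs : q.1 ∈ seen
    · have hrw : pvFirstOcc seen (q :: l) = pvFirstOcc seen l := by
        simp only [pvFirstOcc]
        rw [if_pos ((PySem.Set.contains_iff seen q.1).mpr hs)]
      rw [hrw, ih hl' seen n v]
      constructor
      · rintro ⟨hns, hmem, hmin⟩
        have hne : n ≠ q.1 := fun hEq => hns (hEq ▸ hs)
        refine ⟨hns, List.mem_cons_of_mem _ hmem, ?_⟩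
        intro w hw
        rcases List.mem_cons.mp hw with hwq | hwl
        · exact absurd (congrArg Prod.fst hwq) hne
        · exact hmin w hwl
      · rintro ⟨hns, hmem, hmin⟩
        have hne : n ≠ q.1 := fun hEq => hns (hEq ▸ hs)
        rcases List.mem_cons.mp hmem with hwq | hwl
        · exact absurd (congrArg Prod.fst hwq) hne
        · exact ⟨hns, hwl, fun w hw => hmin w (List.mem_cons_of_mem _ hw)⟩
    · have hrw : pvFirstOcc seen (q :: l) = q :: pvFirstOcc (PySem.Set.add seen q.1) l := by
        simp only [pvFirstOcc]
        rw [if_neg (fun hc => hs ((PySem.Set.contains_iff seen q.1).mp hc))]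
      rw [hrw]
      by_cases hn : n = q.1
      · constructor
        · intro hmem
          rcases List.mem_cons.mp hmem with hEq | hrec
          · have hv : v = q.2 := congrArg Prod.snd hEq
            refine ⟨fun hx => hs (hn ▸ hx), by rw [hEq]; exact List.mem_cons_self, ?_⟩
            intro w hw
            rcases List.mem_cons.mp hw with hwq | hwl
            · have hw2 : w = q.2 := congrArg Prod.snd hwq
              rw [hv, hw2]
            · rw [hv]
              exact le_of_lt (hq _ hwl)
          · exact absurd ((PySem.Set.mem_add seen q.1 n).mpr (Or.inr hn))
              ((ih hl' (PySem.Set.add seen q.1) n v).mp hrec).1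
        · rintro ⟨hns, hmem, hmin⟩
          rcases List.mem_cons.mp hmem with hEq | hwl
          · exact List.mem_cons.mpr (Or.inl hEq)
          · exfalso
            have h1 : q.2 < v := hq _ hwl
            have h2 : v ≤ q.2 := hmin q.2 (by
              rw [show (n, q.2) = q from by rw [hn]]
              exact List.mem_cons_self)
            exact absurd h1 (not_lt.mpr h2)
      · rw [List.mem_cons]
        constructor
        · rintro (hEq | hrec)
          · exact absurd (congrArg Prod.fst hEq) hn
          · obtain ⟨hns, hmem', hmin'⟩ := (ih hl' (PySem.Set.add seen q.1) n v).mp hrec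
            refine ⟨fun hx => hns ((PySem.Set.mem_add seen q.1 n).mpr (Or.inl hx)),
              List.mem_cons_of_mem _ hmem', ?_⟩
            intro w hw
            rcases List.mem_cons.mp hw with hwq | hwl
            · exact absurd (congrArg Prod.fst hwq) hn
            · exact hmin' w hwl
        · rintro ⟨hns, hmem, hmin⟩
          rcases List.mem_cons.mp hmem with hEq | hwl
          · exact absurd (congrArg Prod.fst hEq) hn
          · refine Or.inr ((ih hl' (PySem.Set.add seen q.1) n v).mpr
              ⟨?_, hwl, fun w hw => hmin w (List.mem_cons_of_mem _ hw)⟩)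
            intro hx
            rcases (PySem.Set.mem_add seen q.1 n).mp hx with hx1 | hx2
            · exact hns hx1
            · exact hn hx2

-- (4) one step of B's table update preserves the invariant
lemma pv_inv_step (d du : PySem.Dict String (Lex (List String × Int)))
    (prev : List (String × Lex (List String × Int)))
    (nm : String) (k v' : Lex (List String × Int))
    (hi : pvInv d prev)
    (hget : ∀ n, du.get? n = if n = nm then some v' else d.get? n)
    (hv : v' = k ∨ d.get? nm = some v')
    (hle : v' ≤ k)
    (hmin : ∀ u, d.get? nm = some u → v' ≤ u) :
    pvInv du (prev ++ [(nm, k)]) := by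
  intro n
  rw [hget n]
  by_cases hn : n = nm
  · subst hn
    rw [if_pos rfl]
    constructor
    · rcases hv with rfl | hsome
      · exact List.mem_append.mpr (Or.inr (List.mem_singleton.mpr rfl))
      · have := hi n
        rw [hsome] at this
        exact List.mem_append.mpr (Or.inl this.1)
    · intro w hw
      rcases List.mem_append.mp hw with hwp | hws
      · have := hi n
        cases hg : d.get? n with
        | none => rw [hg] at this; exact absurd hwp (this w)
        | some u =>
          rw [hg] at this
          exact le_trans (hmin u hg) (this.2 w hwp)
      · rw [show w = k from congrArg Prod.snd (List.mem_singleton.mp hws)]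
        exact hle
  · simp only [if_neg hn]
    have := hi n
    cases hg : d.get? n with
    | none =>
      rw [hg] at this
      intro w hw
      rcases List.mem_append.mp hw with hwp | hws
      · exact this w hwp
      · exact hn (congrArg Prod.fst (List.mem_singleton.mp hws))
    | some u =>
      rw [hg] at this
      refine ⟨List.mem_append.mpr (Or.inl this.1), ?_⟩
      intro w hw
      rcases List.mem_append.mp hw with hwp | hws
      · exact this.2 w hwp
      · exact absurd (congrArg Prod.fst (List.mem_singleton.mp hws)) hn

-- (5) B's fold keeps pvInv
lemma pv_best_spec : ∀ (ts : List (List (String × String))) (i : Int)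
    (d : PySem.Dict String (Lex (List String × Int)))
    (prev : List (String × Lex (List String × Int))),
    d.keys.Nodup → pvInv d prev →
    ((List.foldl
      (fun (best : PySem.Dict String (Lex (List String × Int))) p =>
        let name := pvNameOf p.2
        if name = "" then best
        else
          let k := toLex (pvKey3 p.2, p.1)
          match best.get? name with
          | none => best.insert name k
          | some cur => if k < cur then best.insert name k else best)
      d (PySem.List.enumerate ts i)).keys.Nodup ∧
     pvInv (List.foldl
      (fun (best : PySem.Dict String (Lex (List String × Int))) p =>
        let name := pvNameOf p.2
        if name = "" then best
        else
          let k := toLex (pvKey3 p.2, p.1)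
          match best.get? name with
          | none => best.insert name k
          | some cur => if k < cur then best.insert name k else best)
      d (PySem.List.enumerate ts i)) (prev ++ pvT (PySem.List.enumerate ts i))) := by
  intro ts
  induction ts with
  | nil =>
    intro i d prev hk hi
    simp only [PySem.List.enumerate_nil, List.foldl_nil]
    exact ⟨hk, by simpa [pvT] using hi⟩
  | cons x ts ih =>
    intro i d prev hk hi
    rw [PySem.List.enumerate_cons]
    simp only [List.foldl_cons]
    by_cases h1 : pvNameOf x = ""
    · have hT0 : pvT ((i, x) :: PySem.List.enumerate ts (i + 1)) = pvT (PySem.List.enumerate ts (i + 1)) := by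
        simp [pvT, pvPair, h1]
      rw [hT0]
      have hres := ih (i + 1) d prev hk hi
      simpa [h1] using hres
    · have hT1 : pvT ((i, x) :: PySem.List.enumerate ts (i + 1))
          = (pvNameOf x, toLex (pvKey3 x, i)) :: pvT (PySem.List.enumerate ts (i + 1)) := by
        simp [pvT, pvPair, pvF, h1]
      rw [hT1]
      rcases hg : d.get? (pvNameOf x) with _ | cur
      · have hres := ih (i + 1) (d.insert (pvNameOf x) (toLex (pvKey3 x, i)))
          (prev ++ [(pvNameOf x, toLex (pvKey3 x, i))])
          (PySem.Dict.nodup_keys_insert _ _ _ hk)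
          (pv_inv_step d _ prev (pvNameOf x) (toLex (pvKey3 x, i)) (toLex (pvKey3 x, i)) hi
            (fun n => PySem.Dict.get?_insert _ _ _ _)
            (Or.inl rfl) (le_refl _)
            (fun u hu => by rw [hg] at hu; exact absurd hu (by simp)))
        rw [List.append_assoc, List.singleton_append] at hres
        simpa [h1, hg] using hres
      · by_cases hlt : toLex (pvKey3 x, i) < cur
        · have hres := ih (i + 1) (d.insert (pvNameOf x) (toLex (pvKey3 x, i)))
            (prev ++ [(pvNameOf x, toLex (pvKey3 x, i))])
            (PySem.Dict.nodup_keys_insert _ _ _ hk)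
            (pv_inv_step d _ prev (pvNameOf x) (toLex (pvKey3 x, i)) (toLex (pvKey3 x, i)) hi
              (fun n => PySem.Dict.get?_insert _ _ _ _)
              (Or.inl rfl) (le_refl _)
              (fun u hu => by
                rw [hg] at hu
                rw [show u = cur from (Option.some.injEq _ _).mp hu.symm]
                exact le_of_lt hlt))
          rw [List.append_assoc, List.singleton_append] at hres
          simpa [h1, hg, hlt] using hres
        · have hres := ih (i + 1) d
            (prev ++ [(pvNameOf x, toLex (pvKey3 x, i))]) hk
            (pv_inv_step d d prev (pvNameOf x) (toLex (pvKey3 x, i)) cur hi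
              (fun n => by by_cases hn : n = pvNameOf x <;> simp [hn, hg])
              (Or.inr hg) (not_lt.mp hlt)
              (fun u hu => by
                rw [hg] at hu
                rw [show u = cur from (Option.some.injEq _ _).mp hu.symm]))
          rw [List.append_assoc, List.singleton_append] at hres
          simpa [h1, hg, hlt] using hres

-- (6) strictness of the decorated sort keys
lemma pv_S_pairwise (E : List (Int × List (String × String))) (hE : (E.map (·.1)).Nodup) :
    (PySem.List.sorted E pvF).Pairwise (fun p q => pvF p < pvF q) := by
  have hperm : (PySem.List.sorted E pvF).Perm E := PySem.List.sorted_perm E pvF false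
  have hle := PySem.List.sorted_pairwise E pvF
  have hnd : ((PySem.List.sorted E pvF).map (·.1)).Nodup :=
    ((hperm.map (·.1)).nodup_iff).mpr hE
  have hne : (PySem.List.sorted E pvF).Pairwise (fun p q => p.1 ≠ q.1) :=
    List.pairwise_map.mp hnd
  refine (hle.and hne).imp ?_
  rintro a b ⟨hab, hne'⟩
  refine lt_of_le_of_ne hab ?_
  intro hEq
  exact hne' (congrArg (fun z => (ofLex z).2) hEq)

-- A in terms of pvFirstOcc over the decorated sorted list
lemma pv_A_char (sp : List (String × List (List (String × String)))) :
    collect_selected_rule_names_py sp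
      = (pvFirstOcc PySem.Set.empty
          (pvT (PySem.List.sorted (PySem.List.enumerate (PySem.Dict.getD (PySem.Dict.mk sp) "selected_rule_targets" []) 0) pvF))).map (·.1) := by
  unfold collect_selected_rule_names_py
  rw [pv_sorted_decorated, pv_foldA, pv_names_T, pv_dedup_firstOcc, List.nil_append]

-- ===== VERDICT (by name: the statement is the Claim_ definition above) =====
theorem collect_selected_rule_names_py_spec : Claim_equal_collect_selected_rule_names_py := by
  intro sp _
  unfold Spec_collect_selected_rule_names_py
  have hE : (((PySem.List.enumerate (PySem.Dict.getD (PySem.Dict.mk sp) "selected_rule_targets" []) 0)).map (·.1)).Nodup := by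
    rw [PySem.List.map_fst_enumerate]
    exact PySem.List.nodup_pyRange_one _ _
  have hpwS := pv_S_pairwise _ hE
  have hT : (pvT (PySem.List.sorted (PySem.List.enumerate (PySem.Dict.getD (PySem.Dict.mk sp) "selected_rule_targets" []) 0) pvF)).Pairwise
      (fun a b => a.2 < b.2) := by
    unfold pvT
    have h1 : ((PySem.List.sorted (PySem.List.enumerate (PySem.Dict.getD (PySem.Dict.mk sp) "selected_rule_targets" []) 0) pvF).map pvPair).Pairwise
        (fun a b => a.2 < b.2) :=
      (List.pairwise_map (f := pvPair)).mpr (hpwS.imp (fun h => h))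
    exact h1.filter _
  obtain ⟨hbk, hbi⟩ := pv_best_spec (PySem.Dict.getD (PySem.Dict.mk sp) "selected_rule_targets" []) 0
    PySem.Dict.empty [] (PySem.Dict.nodup_keys_empty)
    (by intro n; simp [PySem.Dict.get?_empty])
  rw [List.nil_append] at hbi
  set B := List.foldl
      (fun (best : PySem.Dict String (Lex (List String × Int))) p =>
        let name := pvNameOf p.2
        if name = "" then best
        else
          let k := toLex (pvKey3 p.2, p.1)
          match best.get? name with
          | none => best.insert name k
          | some cur => if k < cur then best.insert name k else best)
      PySem.Dict.empty (PySem.List.enumerate (PySem.Dict.getD (PySem.Dict.mk sp) "selected_rule_targets" []) 0) with hB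
  have hTperm : (pvT (PySem.List.sorted (PySem.List.enumerate (PySem.Dict.getD (PySem.Dict.mk sp) "selected_rule_targets" []) 0) pvF)).Perm
      (pvT (PySem.List.enumerate (PySem.Dict.getD (PySem.Dict.mk sp) "selected_rule_targets" []) 0)) := by
    unfold pvT
    exact ((PySem.List.sorted_perm _ pvF false).map pvPair).filter _
  have hUpw := (hT.sublist (pv_firstOcc_sublist _ PySem.Set.empty))
  have hUnd : (pvFirstOcc PySem.Set.empty
      (pvT (PySem.List.sorted (PySem.List.enumerate (PySem.Dict.getD (PySem.Dict.mk sp) "selected_rule_targets" []) 0) pvF))).Nodup :=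
    List.Pairwise.imp (fun h hEq => absurd h (by rw [hEq]; exact lt_irrefl _)) hUpw
  have hBnd : B.items.Nodup := by
    have := hbk
    simp only [PySem.Dict.keys] at this
    exact this.of_map
  have hmemU : ∀ n v, ((n, v) ∈ pvFirstOcc PySem.Set.empty
      (pvT (PySem.List.sorted (PySem.List.enumerate (PySem.Dict.getD (PySem.Dict.mk sp) "selected_rule_targets" []) 0) pvF)) ↔
      (n, v) ∈ B.items) := by
    intro n v
    rw [pv_mem_firstOcc _ hT PySem.Set.empty n v]
    rw [← PySem.Dict.get?_eq_some_iff_mem_items _ _ _ hbk]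
    have hchar := hbi n
    constructor
    · rintro ⟨_, hmem, hmin⟩
      have hmemE := hTperm.mem_iff.mp hmem
      cases hg : B.get? n with
      | none =>
        rw [hg] at hchar
        exact absurd hmemE (hchar v)
      | some u =>
        rw [hg] at hchar
        have h1 : v ≤ u := hmin u (hTperm.mem_iff.mpr hchar.1)
        have h2 : u ≤ v := hchar.2 v hmemE
        rw [le_antisymm h1 h2]
    · intro hg
      rw [hg] at hchar
      refine ⟨by simp [PySem.Set.empty], hTperm.mem_iff.mpr hchar.1, ?_⟩
      intro w hw
      exact hchar.2 w (hTperm.mem_iff.mp hw)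
  have hperm : (pvFirstOcc PySem.Set.empty
      (pvT (PySem.List.sorted (PySem.List.enumerate (PySem.Dict.getD (PySem.Dict.mk sp) "selected_rule_targets" []) 0) pvF))).Perm B.items :=
    (List.perm_ext_iff_of_nodup hUnd hBnd).mpr (fun x => by
      obtain ⟨n, v⟩ := x
      exact hmemU n v)
  have hsorted := PySem.List.sorted_eq_of_perm_of_pairwise_lt
    (key := fun kv => kv.2) B.items _ hperm hUpw
  have halt : collect_selected_rule_names_py_alt sp
      = (PySem.List.sorted B.items (fun kv => kv.2)).map (fun kv => kv.1) := by
    rw [hB]; rfl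
  rw [pv_A_char, halt, hsorted]
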